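-- pv_equiv track=rewrite | github.com/Moaz-Allam/Quine-McCluskey-Simulator | QM.py | get_uncovered_minterms
-- ===== SOURCE A (Python) =====
-- def get_uncovered_minterms(essential_pis, minterms):
--     """Find minterms not covered by essential PIs."""
--     covered = set()
--     for binary, mins in essential_pis:
--         for m in mins:
--             if m in minterms:
--                 covered.add(m)
--
--     uncovered = set(minterms) - covered
--     return uncovered
-- ===== SOURCE B (Python) =====
-- def get_uncovered_minterms(essential_pis, minterms):
--     """Find minterms not covered by essential PIs."""
--     return {m for m in minterms
--             if not any(m in mins for _, mins in essential_pis)}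
-- ===== Notes on version B (the rewrite author's own statement) =====
-- stated objective: simpler
-- what changed: B scans the minterms once and keeps each one that no essential PI's minterm list contains, instead of first building a 'covered' set by iterating over all PIs and then subtracting it from set(minterms).
import Mathlib
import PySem

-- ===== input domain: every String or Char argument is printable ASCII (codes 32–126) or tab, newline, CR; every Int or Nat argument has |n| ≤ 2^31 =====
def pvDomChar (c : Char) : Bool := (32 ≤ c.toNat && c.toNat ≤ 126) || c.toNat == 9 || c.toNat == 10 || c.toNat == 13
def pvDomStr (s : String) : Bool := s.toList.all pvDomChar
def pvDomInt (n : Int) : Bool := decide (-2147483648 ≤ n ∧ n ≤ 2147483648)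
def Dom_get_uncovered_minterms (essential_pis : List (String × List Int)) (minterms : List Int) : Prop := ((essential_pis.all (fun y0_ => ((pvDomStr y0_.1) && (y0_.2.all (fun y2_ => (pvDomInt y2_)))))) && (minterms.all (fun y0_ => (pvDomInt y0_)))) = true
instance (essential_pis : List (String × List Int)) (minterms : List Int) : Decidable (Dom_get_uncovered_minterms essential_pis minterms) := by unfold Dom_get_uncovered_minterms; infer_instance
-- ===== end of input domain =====

-- B replaces A's two-phase "build a covered set, then subtract it" with a single
-- scan of the minterms keeping those no essential PI covers (objective: simpler).
-- Both Pythons return a set; the ports return it as a PySem.Set (distinct elements).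

-- ===== PORT A =====
-- covered = set(); for binary, mins in essential_pis: for m in mins: if m in minterms: covered.add(m)
-- return set(minterms) - covered
def get_uncovered_minterms (essential_pis : List (String × List Int)) (minterms : List Int) : List Int :=
  let covered : PySem.Set Int :=
    essential_pis.foldl (fun cov p =>
      p.2.foldl (fun cov m =>
        if minterms.contains m then PySem.Set.add cov m else cov) cov)
      PySem.Set.empty
  PySem.Set.diff (PySem.Set.ofList minterms) covered

-- ===== PORT B =====
-- {m for m in minterms if not any(m in mins for _, mins in essential_pis)}
def get_uncovered_minterms_alt (essential_pis : List (String × List Int)) (minterms : List Int) : List Int :=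
  minterms.foldl (fun s m =>
    if !(essential_pis.any (fun p => p.2.contains m)) then PySem.Set.add s m else s)
    PySem.Set.empty

-- ===== PRECONDITION & SPEC =====
def Spec_get_uncovered_minterms (essential_pis : List (String × List Int)) (minterms : List Int) (out : List Int) : Prop := out = get_uncovered_minterms_alt essential_pis minterms
instance (essential_pis : List (String × List Int)) (minterms : List Int) (out : List Int) : Decidable (Spec_get_uncovered_minterms essential_pis minterms out) := by unfold Spec_get_uncovered_minterms; infer_instance

-- ===== CLAIM (what is proved, stated in full; the proofs are below) =====
def Claim_equal_get_uncovered_minterms : Prop := ∀ (essential_pis : List (String × List Int)) (minterms : List Int), Dom_get_uncovered_minterms essential_pis minterms → Spec_get_uncovered_minterms essential_pis minterms (get_uncovered_minterms essential_pis minterms)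

-- ===== LEMMAS AND PROOFS =====

-- B's fold adds exactly the elements passing q, i.e. it is set(filter q L).
theorem foldl_add_if_eq_ofList_filter (q : Int → Bool) (L : List Int) (s : PySem.Set Int) :
    L.foldl (fun s m => if q m then PySem.Set.add s m else s) s
      = (L.filter q).foldl PySem.Set.add s := by
  induction L generalizing s with
  | nil => rfl
  | cons x xs ih =>
    by_cases h : q x = true
    · simp [List.foldl, h, ih]
    · simp [List.foldl, h, ih]

-- membership in A's inner fold over one PI's minterm list
theorem mem_inner_fold (minterms : List Int) (mins : List Int) (s : PySem.Set Int) (x : Int) :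
    x ∈ mins.foldl (fun cov m => if minterms.contains m then PySem.Set.add cov m else cov) s
      ↔ x ∈ s ∨ (x ∈ mins ∧ x ∈ minterms) := by
  induction mins generalizing s with
  | nil => simp
  | cons y ys ih =>
    by_cases h : minterms.contains y = true
    · simp only [List.foldl, h, if_pos]
      rw [ih]
      simp only [PySem.Set.mem_add, List.mem_cons]
      constructor
      · rintro (⟨hs | hxy⟩ | ⟨hys, hm⟩)
        · exact Or.inl hs
        · exact Or.inr ⟨Or.inl hxy, hxy ▸ (by simpa using h)⟩
        · exact Or.inr ⟨Or.inr hys, hm⟩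
      · rintro (hs | ⟨hxy | hys, hm⟩)
        · exact Or.inl (Or.inl hs)
        · exact Or.inl (Or.inr hxy)
        · exact Or.inr ⟨hys, hm⟩
    · simp only [List.foldl, h, if_neg, Bool.false_eq_true, not_false_iff]
      rw [ih]
      simp only [List.mem_cons]
      constructor
      · rintro (hs | ⟨hys, hm⟩)
        · exact Or.inl hs
        · exact Or.inr ⟨Or.inr hys, hm⟩
      · rintro (hs | ⟨hxy | hys, hm⟩)
        · exact Or.inl hs
        · exact absurd (by simpa using hxy ▸ hm) (by simpa using h)
        · exact Or.inr ⟨hys, hm⟩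

-- membership in A's covered set
theorem mem_covered (essential_pis : List (String × List Int)) (minterms : List Int)
    (s : PySem.Set Int) (x : Int) :
    x ∈ essential_pis.foldl (fun cov p =>
        p.2.foldl (fun cov m => if minterms.contains m then PySem.Set.add cov m else cov) cov) s
      ↔ x ∈ s ∨ ((∃ p ∈ essential_pis, x ∈ p.2) ∧ x ∈ minterms) := by
  induction essential_pis generalizing s with
  | nil => simp
  | cons p ps ih =>
    simp only [List.foldl, ih, mem_inner_fold, List.mem_cons]
    constructor
    · rintro ((hs | ⟨hp, hm⟩) | ⟨⟨q, hq, hxq⟩, hm⟩)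
      · exact Or.inl hs
      · exact Or.inr ⟨⟨p, Or.inl rfl, hp⟩, hm⟩
      · exact Or.inr ⟨⟨q, Or.inr hq, hxq⟩, hm⟩
    · rintro (hs | ⟨⟨q, (rfl | hq), hxq⟩, hm⟩)
      · exact Or.inl (Or.inl hs)
      · exact Or.inl (Or.inr ⟨hxq, hm⟩)
      · exact Or.inr ⟨⟨q, hq, hxq⟩, hm⟩

-- filter commutes with discard (both are filters)
theorem filter_discard (r : Int → Bool) (s : List Int) (x : Int) :
    List.filter r (PySem.Set.discard s x) = PySem.Set.discard (List.filter r s) x := by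
  show List.filter r (List.filter (fun y => y != x) s)
        = List.filter (fun y => y != x) (List.filter r s)
  simp only [List.filter_filter]
  exact List.filter_congr (fun a _ => Bool.and_comm _ _)

-- discarding x is a no-op under a filter that rejects x
theorem filter_discard_of_neg (r : Int → Bool) (s : List Int) (x : Int) (h : ¬ r x = true) :
    List.filter r (PySem.Set.discard s x) = List.filter r s := by
  show List.filter r (List.filter (fun y => y != x) s) = _
  simp only [List.filter_filter]
  refine List.filter_congr (fun a _ => ?_)
  by_cases hax : a = x
  · subst hax; simp [eq_false_of_ne_true h]
  · simp [hax]

-- filtering commutes with set(·) (first-occurrence dedup)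
theorem filter_ofList (r : Int → Bool) (L : List Int) :
    (PySem.Set.ofList L).filter r = PySem.Set.ofList (L.filter r) := by
  induction L with
  | nil => rfl
  | cons x xs ih =>
    rw [PySem.Set.ofList_cons]
    by_cases h : r x = true
    · rw [List.filter_cons_of_pos h, List.filter_cons_of_pos h, PySem.Set.ofList_cons,
        ← ih, filter_discard]
    · rw [List.filter_cons_of_neg (by simpa using h), List.filter_cons_of_neg (by simpa using h),
        ← ih, filter_discard_of_neg r _ x h]

-- the two per-minterm tests agree on members of minterms
theorem tests_agree (essential_pis : List (String × List Int)) (minterms : List Int) (x : Int)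
    (hx : x ∈ minterms) :
    (!PySem.Set.contains
        (essential_pis.foldl (fun cov p =>
          p.2.foldl (fun cov m => if minterms.contains m then PySem.Set.add cov m else cov) cov)
          PySem.Set.empty) x)
      = (!(essential_pis.any (fun p => p.2.contains x))) := by
  congr 1
  rw [Bool.eq_iff_iff]
  rw [PySem.Set.contains_iff, mem_covered]
  simp [PySem.Set.empty, List.any_eq_true, hx]

-- ===== VERDICT (by name: the statement is the Claim_ definition above) =====
theorem get_uncovered_minterms_spec : Claim_equal_get_uncovered_minterms := by
  intro essential_pis minterms _
  show PySem.Set.diff (PySem.Set.ofList minterms) _ = _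
  rw [get_uncovered_minterms_alt, foldl_add_if_eq_ofList_filter,
    show (PySem.Set.empty : PySem.Set Int) = [] from rfl,
    ← PySem.Set.ofList_eq_foldl, ← filter_ofList]
  show List.filter _ (PySem.Set.ofList minterms) = _
  refine List.filter_congr (fun x hx => ?_)
  exact tests_agree essential_pis minterms x ((PySem.Set.mem_ofList _ _).mp hx)
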